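-- pv_equiv track=rewrite | github.com/jungianca6/Ejercicios_IntroYTaller | Códigos/Trabajo en clase #9 Intro Progra-Aproximacion y cola-GVM.py | eliminarmenor
-- ===== SOURCE A (Python) =====
-- def eliminarmenor(lista,menor,lista1,ele):
--     if lista==[]: # caso base
--         return lista1
--     elif lista[0]==menor and ele==0:
--         return eliminarmenor(lista[1:],menor,lista1,ele+1)
--     elif ele>=1:
--         return eliminarmenor(lista[1:],menor,lista1+[lista[0]],ele)
--     else:
--         return eliminarmenor(lista[1:],menor,lista1+[lista[0]],ele)
-- ===== SOURCE B (Python) =====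
-- def eliminarmenor(lista, menor, lista1, ele):
--     result = list(lista1)
--     removed = ele != 0
--     for x in lista:
--         if x == menor and not removed:
--             removed = True
--         else:
--             result.append(x)
--     return result
-- ===== Notes on version B (the rewrite author's own statement) =====
-- stated objective: faster
-- what changed: Replaces the accumulator-passing recursion (with a redundant ele>=1 branch) by a single iterative loop over lista with a boolean removed flag, appending to a result list.
import Mathlib
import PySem

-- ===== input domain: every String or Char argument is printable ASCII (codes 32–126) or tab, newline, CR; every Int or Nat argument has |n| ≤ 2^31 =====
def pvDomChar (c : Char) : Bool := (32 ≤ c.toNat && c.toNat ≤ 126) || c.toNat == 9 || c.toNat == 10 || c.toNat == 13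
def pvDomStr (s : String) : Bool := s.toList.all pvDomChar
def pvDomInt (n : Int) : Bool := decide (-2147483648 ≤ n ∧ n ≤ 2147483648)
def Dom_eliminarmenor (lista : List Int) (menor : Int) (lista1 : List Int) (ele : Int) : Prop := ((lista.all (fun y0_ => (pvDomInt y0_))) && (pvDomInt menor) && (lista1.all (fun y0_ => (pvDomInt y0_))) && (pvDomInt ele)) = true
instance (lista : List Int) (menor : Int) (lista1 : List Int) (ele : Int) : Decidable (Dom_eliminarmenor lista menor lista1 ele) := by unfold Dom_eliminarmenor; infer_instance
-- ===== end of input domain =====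

-- B replaces the accumulator-passing recursion by a single iterative loop with a 'removed' flag (objective: faster — B is O(n), A rebuilds the accumulator per call).

-- ===== PORT A =====
def eliminarmenor (lista : List Int) (menor : Int) (lista1 : List Int) (ele : Int) : List Int :=
  match lista with
  | [] => lista1
  | x :: rest =>
    if x = menor ∧ ele = 0 then
      eliminarmenor rest menor lista1 (ele + 1)
    else if ele ≥ 1 then
      eliminarmenor rest menor (lista1 ++ [x]) ele
    else
      eliminarmenor rest menor (lista1 ++ [x]) ele

-- ===== PORT B =====
def eliminarmenor_alt (lista : List Int) (menor : Int) (lista1 : List Int) (ele : Int) : List Int :=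
  (lista.foldl
    (fun (st : List Int × Bool) x =>
      if x = menor ∧ st.2 = false then (st.1, true) else (st.1 ++ [x], st.2))
    (lista1, decide (ele ≠ 0))).1

-- ===== PRECONDITION & SPEC =====
def Spec_eliminarmenor (lista : List Int) (menor : Int) (lista1 : List Int) (ele : Int) (out : List Int) : Prop := out = eliminarmenor_alt lista menor lista1 ele
instance (lista : List Int) (menor : Int) (lista1 : List Int) (ele : Int) (out : List Int) : Decidable (Spec_eliminarmenor lista menor lista1 ele out) := by unfold Spec_eliminarmenor; infer_instance

-- ===== CLAIM (what is proved, stated in full; the proofs are below) =====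
def Claim_equal_eliminarmenor : Prop := ∀ (lista : List Int) (menor : Int) (lista1 : List Int) (ele : Int), Dom_eliminarmenor lista menor lista1 ele → Spec_eliminarmenor lista menor lista1 ele (eliminarmenor lista menor lista1 ele)

-- ===== LEMMAS AND PROOFS =====

theorem eliminarmenor_eq_foldl (lista : List Int) (menor : Int) (lista1 : List Int) (ele : Int) :
    eliminarmenor lista menor lista1 ele =
      (lista.foldl
        (fun (st : List Int × Bool) x =>
          if x = menor ∧ st.2 = false then (st.1, true) else (st.1 ++ [x], st.2))
        (lista1, decide (ele ≠ 0))).1 := by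
  induction lista generalizing lista1 ele with
  | nil => simp [eliminarmenor]
  | cons x rest ih =>
    by_cases h : x = menor ∧ ele = 0
    · have hd0 : (decide (ele ≠ 0)) = false := by simp [h.2]
      simp [eliminarmenor, h, List.foldl]
      rw [ih lista1 1]
      norm_num
    · have hA : eliminarmenor (x :: rest) menor lista1 ele =
          eliminarmenor rest menor (lista1 ++ [x]) ele := by
        by_cases h2 : ele ≥ 1 <;> simp [eliminarmenor, h, h2]
      rw [hA, ih (lista1 ++ [x]) ele]
      by_cases hd : (decide (ele ≠ 0)) = false
      · have he : ele = 0 := by simpa using hd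
        have hx : x ≠ menor := fun hc => h ⟨hc, he⟩
        simp [List.foldl, hx, hd]
      · have hx : ¬ (x = menor ∧ (decide (ele ≠ 0)) = false) := by
          intro hc; exact hd hc.2
        simp only [List.foldl, if_neg hx]

-- ===== VERDICT (by name: the statement is the Claim_ definition above) =====
theorem eliminarmenor_spec : Claim_equal_eliminarmenor := by
  intro lista menor lista1 ele _
  unfold Spec_eliminarmenor eliminarmenor_alt
  exact eliminarmenor_eq_foldl lista menor lista1 ele
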